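-- pv_equiv track=rewrite | github.com/Sahana-17/AOC-2021 | Day_02/day2.py | depth_part2
-- ===== SOURCE A (Python) =====
-- def depth_part2(lines):
--
--     horizontal = 0
--     depth = 0
--     aim = 0
--     final_value = 0
--
--     for line in lines:
--         line = line.strip()
--
--         for i in range(len(line)):
--             if line[i].isdigit():
--                 value = int(line[i])
--
--                 if line[0] == 'f':
--                     horizontal += value
--                     depth += aim * value
--                 elif line[0] == 'u':
--                     aim -= value
--                 else:
--                     aim += value
--
--
--     final_value = horizontal * depth
--
--     return final_value
-- ===== SOURCE B (Python) =====
-- def depth_part2(lines):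
--     # Staged passes: parse commands, prefix-sum the aim, then two sums.
--     cmds = []
--     for raw in lines:
--         t = raw.strip()
--         if t:
--             cmds.append((t[0], sum(int(c) for c in t if c.isdigit())))
--     aims = []
--     a = 0
--     for op, s in cmds:
--         aims.append(a)
--         if op == 'u':
--             a -= s
--         elif op != 'f':
--             a += s
--     horizontal = sum(s for op, s in cmds if op == 'f')
--     depth = sum(a0 * s for (op, s), a0 in zip(cmds, aims) if op == 'f')
--     return horizontal * depth
-- ===== Notes on version B (the rewrite author's own statement) =====
-- stated objective: alternative
-- what changed: B replaces A's single stateful per-character fold with staged passes over intermediate lists: parse each line once into (command-letter, digit-sum) pairs, build the prefix-sum list of aim values, then compute horizontal and depth as two independent sums over the parsed list zipped with the aim prefixes.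
import Mathlib
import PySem

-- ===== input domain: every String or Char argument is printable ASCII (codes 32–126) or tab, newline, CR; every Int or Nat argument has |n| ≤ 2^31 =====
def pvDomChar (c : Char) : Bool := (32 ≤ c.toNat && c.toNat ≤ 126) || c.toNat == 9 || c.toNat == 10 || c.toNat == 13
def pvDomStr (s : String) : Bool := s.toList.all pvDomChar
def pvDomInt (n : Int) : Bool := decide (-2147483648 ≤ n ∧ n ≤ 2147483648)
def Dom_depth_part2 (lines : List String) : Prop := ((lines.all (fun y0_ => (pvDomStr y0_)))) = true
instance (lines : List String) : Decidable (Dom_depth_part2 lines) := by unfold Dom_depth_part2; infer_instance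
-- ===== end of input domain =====

-- B recomputes the same result by staged passes: parse each line to (command letter, digit sum),
-- prefix-sum the aim, then two independent sums — instead of A's single stateful per-character fold.

-- ===== PORT A =====
-- per-line inner loop: 'for i in range(len(line)): if line[i].isdigit(): value = int(line[i]); <branch on line[0]>'
-- int(line[i]) on a single digit character is its digit value (c.toNat - 48) — exact under the isdigit guard
def depth_part2_lineA (st : Int × Int × Int) (line : String) : Int × Int × Int :=
  let cs := PySem.Chars.strip line.toList
  (PySem.List.pyRange 0 (PySem.List.len cs) 1).foldl
    (fun st i =>
      let c := PySem.List.pyGetD cs i ' '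
      if PySem.Chars.isdigit c then
        let value : Int := (c.toNat : Int) - 48
        if PySem.List.pyGet? cs 0 = some 'f' then
          (st.1 + value, st.2.1 + st.2.2 * value, st.2.2)
        else if PySem.List.pyGet? cs 0 = some 'u' then
          (st.1, st.2.1, st.2.2 - value)
        else
          (st.1, st.2.1, st.2.2 + value)
      else st) st

def depth_part2 (lines : List String) : Int :=
  let st := lines.foldl depth_part2_lineA ((0 : Int), (0 : Int), (0 : Int))
  st.1 * st.2.1

-- ===== PORT B =====
-- parse one line: skip if blank after strip, else (first char, digit sum of the line)
def pvParse (raw : String) : Option (Char × Int) :=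
  let t := PySem.Chars.strip raw.toList
  if t = [] then none
  else some (t.headD ' ', ((t.filter PySem.Chars.isdigit).map (fun c => (c.toNat : Int) - 48)).sum)

def depth_part2_alt (lines : List String) : Int :=
  let cmds := lines.filterMap pvParse
  let aims := (cmds.foldl
      (fun (p : List Int × Int) cs =>
        (p.1 ++ [p.2],
         if cs.1 = 'u' then p.2 - cs.2 else if cs.1 = 'f' then p.2 else p.2 + cs.2))
      ([], 0)).1
  let horizontal := (cmds.filter (fun cs => cs.1 = 'f')).foldl (fun acc cs => acc + cs.2) 0
  let depth := ((cmds.zip aims).filter (fun x => x.1.1 = 'f')).foldl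
      (fun acc x => acc + x.2 * x.1.2) 0
  horizontal * depth

-- ===== PRECONDITION & SPEC =====
def Spec_depth_part2 (lines : List String) (out : Int) : Prop := out = depth_part2_alt lines
instance (lines : List String) (out : Int) : Decidable (Spec_depth_part2 lines out) := by unfold Spec_depth_part2; infer_instance

-- ===== CLAIM (what is proved, stated in full; the proofs are below) =====
def Claim_equal_depth_part2 : Prop := ∀ (lines : List String), Dom_depth_part2 lines → Spec_depth_part2 lines (depth_part2 lines)

-- ===== LEMMAS AND PROOFS =====

-- proof-side: the per-command state update that A's per-line work amounts to
def pvStep (st : Int × Int × Int) (c : Char × Int) : Int × Int × Int :=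
  if c.1 = 'f' then (st.1 + c.2, st.2.1 + st.2.2 * c.2, st.2.2)
  else if c.1 = 'u' then (st.1, st.2.1, st.2.2 - c.2)
  else (st.1, st.2.1, st.2.2 + c.2)

def pvDelta (c : Char × Int) : Int :=
  if c.1 = 'u' then -c.2 else if c.1 = 'f' then 0 else c.2

def pvHor : List (Char × Int) → Int
  | [] => 0
  | c :: t => (if c.1 = 'f' then c.2 else 0) + pvHor t

def pvDep : Int → List (Char × Int) → Int
  | _, [] => 0
  | a, c :: t => (if c.1 = 'f' then a * c.2 else 0) + pvDep (a + pvDelta c) t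

def pvAims : Int → List (Char × Int) → List Int
  | _, [] => []
  | a, c :: t => a :: pvAims (a + pvDelta c) t

def pvDsum (l : List Char) : Int :=
  ((l.filter PySem.Chars.isdigit).map (fun c => (c.toNat : Int) - 48)).sum

lemma pvDsum_cons_digit {c : Char} (t : List Char) (hc : PySem.Chars.isdigit c = true) :
    pvDsum (c :: t) = ((c.toNat : Int) - 48) + pvDsum t := by
  simp [pvDsum, hc]

lemma pvDsum_cons_nondigit {c : Char} (t : List Char) (hc : ¬ PySem.Chars.isdigit c = true) :
    pvDsum (c :: t) = pvDsum t := by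
  simp [pvDsum, hc]

-- the inner character fold of port A, with the (constant) head tests as parameters,
-- equals the one-shot digit-sum update
lemma inner_fold_eq (P Q : Prop) [Decidable P] [Decidable Q] (l : List Char) (h d a : Int) :
    l.foldl
      (fun (st : Int × Int × Int) c =>
        if PySem.Chars.isdigit c then
          let value : Int := (c.toNat : Int) - 48
          if P then (st.1 + value, st.2.1 + st.2.2 * value, st.2.2)
          else if Q then (st.1, st.2.1, st.2.2 - value)
          else (st.1, st.2.1, st.2.2 + value)
        else st) (h, d, a)
    = (if P then (h + pvDsum l, d + a * pvDsum l, a)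
       else if Q then (h, d, a - pvDsum l)
       else (h, d, a + pvDsum l)) := by
  induction l generalizing h d a with
  | nil => simp [pvDsum]
  | cons c t ih =>
    rw [List.foldl_cons]
    by_cases hc : PySem.Chars.isdigit c = true
    · by_cases hP : P
      · have hstep : (if PySem.Chars.isdigit c = true then
            let value : Int := (c.toNat : Int) - 48
            if P then ((h, d, a).1 + value, (h, d, a).2.1 + (h, d, a).2.2 * value, (h, d, a).2.2)
            else if Q then ((h, d, a).1, (h, d, a).2.1, (h, d, a).2.2 - value)
            else ((h, d, a).1, (h, d, a).2.1, (h, d, a).2.2 + value)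
          else (h, d, a))
            = (h + ((c.toNat : Int) - 48), d + a * ((c.toNat : Int) - 48), a) := by
          simp [hc, hP]
        rw [hstep, ih, pvDsum_cons_digit t hc]
        split_ifs <;> exact Prod.ext (by ring) (Prod.ext (by ring) (by ring))
      · by_cases hQ : Q
        · have hstep : (if PySem.Chars.isdigit c = true then
              let value : Int := (c.toNat : Int) - 48
              if P then ((h, d, a).1 + value, (h, d, a).2.1 + (h, d, a).2.2 * value, (h, d, a).2.2)
              else if Q then ((h, d, a).1, (h, d, a).2.1, (h, d, a).2.2 - value)
              else ((h, d, a).1, (h, d, a).2.1, (h, d, a).2.2 + value)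
            else (h, d, a))
              = (h, d, a - ((c.toNat : Int) - 48)) := by
            simp [hc, hP, hQ]
          rw [hstep, ih, pvDsum_cons_digit t hc]
          split_ifs <;> exact Prod.ext (by ring) (Prod.ext (by ring) (by ring))
        · have hstep : (if PySem.Chars.isdigit c = true then
              let value : Int := (c.toNat : Int) - 48
              if P then ((h, d, a).1 + value, (h, d, a).2.1 + (h, d, a).2.2 * value, (h, d, a).2.2)
              else if Q then ((h, d, a).1, (h, d, a).2.1, (h, d, a).2.2 - value)
              else ((h, d, a).1, (h, d, a).2.1, (h, d, a).2.2 + value)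
            else (h, d, a))
              = (h, d, a + ((c.toNat : Int) - 48)) := by
            simp [hc, hP, hQ]
          rw [hstep, ih, pvDsum_cons_digit t hc]
          split_ifs <;> exact Prod.ext (by ring) (Prod.ext (by ring) (by ring))
    · have hstep : (if PySem.Chars.isdigit c = true then
            let value : Int := (c.toNat : Int) - 48
            if P then ((h, d, a).1 + value, (h, d, a).2.1 + (h, d, a).2.2 * value, (h, d, a).2.2)
            else if Q then ((h, d, a).1, (h, d, a).2.1, (h, d, a).2.2 - value)
            else ((h, d, a).1, (h, d, a).2.1, (h, d, a).2.2 + value)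
          else (h, d, a)) = ((h : Int), (d : Int), (a : Int)) := by
        simp [hc]
      rw [hstep, ih, pvDsum_cons_nondigit t hc]

-- A's per-line work is the per-command step on the parsed command (or identity on blank lines)
lemma lineA_eq_step (st : Int × Int × Int) (line : String) :
    depth_part2_lineA st line =
      (match pvParse line with
       | none => st
       | some c => pvStep st c) := by
  obtain ⟨h, d, a⟩ := st
  unfold depth_part2_lineA pvParse pvStep
  simp only []
  rw [PySem.List.foldl_pyRange_zero_pyGetD (PySem.Chars.strip line.toList) (' ')
    (fun (st : Int × Int × Int) c =>
      if PySem.Chars.isdigit c then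
        let value : Int := (c.toNat : Int) - 48
        if PySem.List.pyGet? (PySem.Chars.strip line.toList) 0 = some 'f' then
          (st.1 + value, st.2.1 + st.2.2 * value, st.2.2)
        else if PySem.List.pyGet? (PySem.Chars.strip line.toList) 0 = some 'u' then
          (st.1, st.2.1, st.2.2 - value)
        else (st.1, st.2.1, st.2.2 + value)
      else st) (h, d, a)]
  cases hcs : PySem.Chars.strip line.toList with
  | nil => simp
  | cons c0 t =>
    have h0 : PySem.List.pyGet? (c0 :: t) (0 : Int) = some c0 := by
      simp [PySem.List.pyGet?, PySem.List.pyIdx?]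
    rw [inner_fold_eq (PySem.List.pyGet? (c0 :: t) 0 = some 'f')
        (PySem.List.pyGet? (c0 :: t) 0 = some 'u') (c0 :: t) h d a]
    have hne : (c0 :: t : List Char) ≠ [] := by simp
    simp only [if_neg hne, h0, Option.some.injEq, List.headD_cons, pvDsum]

-- fold A over the lines = fold the step over the parsed commands
lemma foldA_eq_foldStep (lines : List String) (st : Int × Int × Int) :
    lines.foldl depth_part2_lineA st = (lines.filterMap pvParse).foldl pvStep st := by
  induction lines generalizing st with
  | nil => rfl
  | cons l t ih =>
    rw [List.foldl_cons, ih, lineA_eq_step]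
    cases hp : pvParse l with
    | none => simp [List.filterMap_cons, hp]
    | some c => simp [List.filterMap_cons, hp]

-- closed characterization of the step fold
lemma foldStep_eq (cmds : List (Char × Int)) (h d a : Int) :
    cmds.foldl pvStep (h, d, a)
      = (h + pvHor cmds, d + pvDep a cmds, a + (cmds.map pvDelta).sum) := by
  induction cmds generalizing h d a with
  | nil => simp [pvHor, pvDep]
  | cons c t ih =>
    rw [List.foldl_cons]
    have hs : pvStep (h, d, a) c
        = (h + (if c.1 = 'f' then c.2 else 0), d + (if c.1 = 'f' then a * c.2 else 0),
           a + pvDelta c) := by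
      unfold pvStep pvDelta
      split_ifs <;> simp_all [sub_eq_add_neg]
    rw [hs, ih]
    simp only [pvHor, pvDep, List.map_cons, List.sum_cons]
    exact Prod.ext (by ring) (Prod.ext (by ring) (by ring))

-- B's horizontal sum = pvHor
lemma hor_fold_eq (cmds : List (Char × Int)) (acc : Int) :
    (cmds.filter (fun cs => cs.1 = 'f')).foldl (fun acc cs => acc + cs.2) acc
      = acc + pvHor cmds := by
  induction cmds generalizing acc with
  | nil => simp [pvHor]
  | cons c t ih =>
    unfold pvHor
    by_cases h1 : c.1 = 'f'
    · simp only [List.filter_cons, h1, decide_true, if_pos, List.foldl_cons]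
      rw [ih]; ring
    · simp only [List.filter_cons, h1, decide_false, if_neg, Bool.false_eq_true,
        not_false_eq_true]
      rw [ih]; simp [h1]

-- B's aims fold produces the prefix-aim list
lemma aims_fold_eq (cmds : List (Char × Int)) (acc : List Int) (a : Int) :
    (cmds.foldl
      (fun (p : List Int × Int) cs =>
        (p.1 ++ [p.2],
         if cs.1 = 'u' then p.2 - cs.2 else if cs.1 = 'f' then p.2 else p.2 + cs.2))
      (acc, a)).1 = acc ++ pvAims a cmds := by
  induction cmds generalizing acc a with
  | nil => simp [pvAims]
  | cons c t ih =>
    rw [List.foldl_cons]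
    have : (if c.1 = 'u' then a - c.2 else if c.1 = 'f' then a else a + c.2)
        = a + pvDelta c := by
      unfold pvDelta
      by_cases h2 : c.1 = 'u' <;> by_cases h1 : c.1 = 'f' <;> simp [h1, h2] <;> ring
    simp only [this]
    rw [ih]
    simp [pvAims]

-- B's depth sum over the zip with the prefix aims = pvDep
lemma dep_fold_eq (cmds : List (Char × Int)) (a acc : Int) :
    ((cmds.zip (pvAims a cmds)).filter (fun x => x.1.1 = 'f')).foldl
      (fun acc x => acc + x.2 * x.1.2) acc = acc + pvDep a cmds := by
  induction cmds generalizing a acc with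
  | nil => simp [pvAims, pvDep]
  | cons c t ih =>
    simp only [pvAims, pvDep, List.zip_cons_cons, List.filter_cons]
    by_cases h1 : c.1 = 'f'
    · simp only [h1, decide_true, if_true, List.foldl_cons]
      rw [ih]; ring
    · simp only [h1, decide_false, Bool.false_eq_true, if_false]
      rw [ih]; simp [h1]

-- ===== VERDICT (by name: the statement is the Claim_ definition above) =====
theorem depth_part2_spec : Claim_equal_depth_part2 := by
  intro lines _
  unfold Spec_depth_part2 depth_part2 depth_part2_alt
  simp only []
  rw [foldA_eq_foldStep, foldStep_eq,
      hor_fold_eq (lines.filterMap pvParse) 0,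
      aims_fold_eq (lines.filterMap pvParse) [] 0,
      List.nil_append,
      dep_fold_eq (lines.filterMap pvParse) 0 0]
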